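-- pv_equiv track=rewrite | github.com/0xNathaniel/Tubes3_CLCC | src/utils/pdf_extractor.py | extract_words_from_text
-- ===== SOURCE A (Python) =====
-- def extract_words_from_text(text: str, keep_spaces: bool = False) -> str:
--     words = []
--     for line in text.splitlines():
--         line = line.strip().lower()
--         if line:
--             words.extend([word for word in line.split() if word])
--
--     if keep_spaces:
--         return " ".join(words)
--     else:
--         return "".join(words)
-- ===== SOURCE B (Python) =====
-- def extract_words_from_text(text: str, keep_spaces: bool = False) -> str:
--     words = text.lower().split()
--     return (" " if keep_spaces else "").join(words)
-- ===== Notes on version B (the rewrite author's own statement) =====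
-- stated objective: simpler
-- what changed: A's nested pass (splitlines, then strip/lower and an inner split per line, extending an accumulator) is replaced by one flat pass: lower the whole text once and split() it, since every line boundary is whitespace and split() already drops empty tokens.
import Mathlib
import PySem

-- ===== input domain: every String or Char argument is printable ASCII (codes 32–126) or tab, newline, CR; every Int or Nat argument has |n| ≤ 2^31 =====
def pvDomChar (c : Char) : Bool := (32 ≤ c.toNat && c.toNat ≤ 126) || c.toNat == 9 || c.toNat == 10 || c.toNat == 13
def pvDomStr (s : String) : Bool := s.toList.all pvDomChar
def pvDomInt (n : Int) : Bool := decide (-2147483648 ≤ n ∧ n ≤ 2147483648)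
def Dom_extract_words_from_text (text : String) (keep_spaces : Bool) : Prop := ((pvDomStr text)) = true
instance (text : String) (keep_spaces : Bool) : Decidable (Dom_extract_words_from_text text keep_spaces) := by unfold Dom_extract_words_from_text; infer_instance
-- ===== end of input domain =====

-- B replaces A's splitlines/strip/per-line-split nesting with one flat lower-then-split pass (objective: simpler).

-- ===== PORT A =====
def extract_words_from_text (text : String) (keep_spaces : Bool) : String :=
  let words : List String :=
    (PySem.Str.splitlines text).foldl (fun ws line =>
      let line2 := PySem.Str.lower (PySem.Str.strip line)
      if line2 ≠ "" then
        ws ++ ((PySem.Str.split₀ line2).filter (fun w => w ≠ ""))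
      else ws) []
  if keep_spaces then PySem.Str.join " " words else PySem.Str.join "" words

-- ===== PORT B =====
def extract_words_from_text_alt (text : String) (keep_spaces : Bool) : String :=
  let words := PySem.Str.split₀ (PySem.Str.lower text)
  PySem.Str.join (if keep_spaces then " " else "") words

-- ===== PRECONDITION & SPEC =====
def Spec_extract_words_from_text (text : String) (keep_spaces : Bool) (out : String) : Prop := out = extract_words_from_text_alt text keep_spaces
instance (text : String) (keep_spaces : Bool) (out : String) : Decidable (Spec_extract_words_from_text text keep_spaces out) := by unfold Spec_extract_words_from_text; infer_instance

-- ===== CLAIM (what is proved, stated in full; the proofs are below) =====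
def Claim_equal_extract_words_from_text : Prop := ∀ (text : String) (keep_spaces : Bool), Dom_extract_words_from_text text keep_spaces → Spec_extract_words_from_text text keep_spaces (extract_words_from_text text keep_spaces)

-- ===== LEMMAS AND PROOFS =====

-- predicate "not a Python whitespace char"
def notSp (c : Char) : Bool := !PySem.Chars.isspace c

-- the words of a char list: maximal runs of non-whitespace chars
def W : List Char → List (List Char)
  | [] => []
  | c :: s =>
    if PySem.Chars.isspace c then W s
    else (c :: s.takeWhile notSp) :: W (s.dropWhile notSp)
termination_by s => s.length
decreasing_by
  · simp
  · exact Nat.lt_succ_of_le (List.length_dropWhile_le _ _)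

-- split₀.go characterised by W
theorem splitgo_eq_W (s : List Char) : ∀ (cur : List Char) (acc : List (List Char)),
    PySem.Chars.split₀.go s cur acc =
      acc.reverse ++ (if cur = [] then W s
        else (cur.reverse ++ s.takeWhile notSp) :: W (s.dropWhile notSp)) := by
  induction s with
  | nil =>
    intro cur acc
    cases cur <;> simp [PySem.Chars.split₀.go, W]
  | cons c t ih =>
    intro cur acc
    by_cases hc : PySem.Chars.isspace c = true
    · cases cur with
      | nil => simp [PySem.Chars.split₀.go, hc, ih, W]
      | cons a b =>
        simp [PySem.Chars.split₀.go, hc, ih, W, List.takeWhile, List.dropWhile, notSp]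
    · cases cur with
      | nil => simp [PySem.Chars.split₀.go, hc, ih, W]
      | cons a b =>
        simp [PySem.Chars.split₀.go, hc, ih, List.takeWhile, List.dropWhile, notSp]

theorem split₀_eq_W (s : List Char) : PySem.Chars.split₀ s = W s := by
  simpa [PySem.Chars.split₀] using splitgo_eq_W s [] []

theorem dropWhile_head_false {p : Char → Bool} : ∀ {l d r}, List.dropWhile p l = d :: r → p d = false := by
  intro l
  induction l with
  | nil => intro d r h; simp [List.dropWhile] at h
  | cons a t ih =>
    intro d r h
    by_cases hp : p a = true
    · rw [List.dropWhile_cons_of_pos hp] at h; exact ih h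
    · rw [List.dropWhile_cons_of_neg hp] at h
      cases h; simpa using hp

-- a whitespace char splits the word list
theorem W_append_space : ∀ (n : Nat) (u : List Char), u.length ≤ n →
    ∀ (c : Char) (v : List Char), PySem.Chars.isspace c = true →
    W (u ++ c :: v) = W u ++ W v := by
  intro n
  induction n with
  | zero =>
    intro u hu c v hc
    have : u = [] := by cases u <;> simp_all
    subst this; simp [W, hc]
  | succ n ih =>
    intro u hu c v hc
    cases u with
    | nil => simp [W, hc]
    | cons a u' =>
      by_cases ha : PySem.Chars.isspace a = true
      · simp only [List.cons_append, W, ha, if_pos]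
        exact ih u' (by simpa using Nat.le_of_succ_le_succ hu) c v hc
      · simp only [List.cons_append, W, ha, Bool.false_eq_true, if_neg, not_false_iff]
        rcases hdw : u'.dropWhile notSp with _ | ⟨d, dw'⟩
        · have hall : ∀ x ∈ u', notSp x = true := by
            intro x hx
            by_contra hnx
            simp_all
          have htw : u'.takeWhile notSp = u' := List.takeWhile_eq_self_iff.mpr hall
          have h1 : (u' ++ c :: v).takeWhile notSp = u' := by
            rw [List.takeWhile_append_of_pos hall]
            simp [List.takeWhile, notSp, hc]
          have h2 : (u' ++ c :: v).dropWhile notSp = c :: v := by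
            rw [List.dropWhile_append_of_pos hall]
            simp [List.dropWhile, notSp, hc]
          rw [h1, h2]
          simp [W, hc, hdw]
          exact htw.symm
        · have hd : PySem.Chars.isspace d = true := by
            have := dropWhile_head_false hdw
            simpa [notSp] using this
          have hsplit : u' = u'.takeWhile notSp ++ d :: dw' := by
            conv_lhs => rw [← List.takeWhile_append_dropWhile (p := notSp) (l := u')]
            rw [hdw]
          have hall : ∀ x ∈ u'.takeWhile notSp, notSp x = true :=
            fun x hx => List.mem_takeWhile_imp hx
          have h1 : (u' ++ c :: v).takeWhile notSp = u'.takeWhile notSp := by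
            conv_lhs => rw [hsplit]
            rw [List.append_assoc, List.takeWhile_append_of_pos hall]
            simp [List.takeWhile, notSp, hd]
          have h2 : (u' ++ c :: v).dropWhile notSp = d :: (dw' ++ c :: v) := by
            conv_lhs => rw [hsplit]
            rw [List.append_assoc, List.dropWhile_append_of_pos hall]
            simp [List.dropWhile, notSp, hd]
          have hlen : dw'.length ≤ n := by
            have : u'.length ≤ n := by simpa using Nat.le_of_succ_le_succ hu
            have h3 : dw'.length < u'.length := by
              rw [hsplit]; simp; omega
            omega
          rw [h1, h2]
          simp only [W, hd, if_pos]
          rw [ih dw' hlen c v hc]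

theorem W_all_space (r : List Char) (h : ∀ c ∈ r, PySem.Chars.isspace c = true) : W r = [] := by
  induction r with
  | nil => simp [W]
  | cons c t ih =>
    have hc := h c (by simp)
    simp [W, hc]
    exact ih (fun x hx => h x (by simp [hx]))

theorem W_append_all_space (u r : List Char) (h : ∀ c ∈ r, PySem.Chars.isspace c = true) :
    W (u ++ r) = W u := by
  cases r with
  | nil => simp
  | cons c t =>
    rw [W_append_space u.length u le_rfl c t (h c (by simp))]
    rw [W_all_space t (fun x hx => h x (by simp [hx]))]
    simp

theorem rev_decomp (p : Char → Bool) (l : List Char) :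
    l = (List.dropWhile p l.reverse).reverse ++ (List.takeWhile p l.reverse).reverse := by
  calc l = l.reverse.reverse := (List.reverse_reverse l).symm
    _ = (List.takeWhile p l.reverse ++ List.dropWhile p l.reverse).reverse := by
        rw [List.takeWhile_append_dropWhile]
    _ = _ := by rw [List.reverse_append]

theorem W_strip (s : List Char) : W (PySem.Chars.strip s) = W s := by
  unfold PySem.Chars.strip PySem.Chars.rstrip PySem.Chars.lstrip
  have hl : ∀ t : List Char, W (List.dropWhile PySem.Chars.isspace t) = W t := by
    intro t
    induction t with
    | nil => simp
    | cons c t ih =>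
      by_cases hc : PySem.Chars.isspace c = true
      · rw [List.dropWhile_cons_of_pos hc, ih]; simp [W, hc]
      · rw [List.dropWhile_cons_of_neg hc]
  set u := List.dropWhile PySem.Chars.isspace s with hu
  rw [← hl s, ← hu]
  have hdecomp : u = (List.dropWhile PySem.Chars.isspace u.reverse).reverse ++
      (List.takeWhile PySem.Chars.isspace u.reverse).reverse :=
    rev_decomp PySem.Chars.isspace u
  conv_rhs => rw [hdecomp]
  rw [W_append_all_space]
  intro c hc
  rw [List.mem_reverse] at hc
  exact List.mem_takeWhile_imp hc

theorem W_mem_ne_nil : ∀ (n : Nat) (s : List Char), s.length ≤ n → ∀ w ∈ W s, w ≠ [] := by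
  intro n
  induction n with
  | zero =>
    intro s hs
    have : s = [] := by cases s <;> simp_all
    subst this; simp [W]
  | succ n ih =>
    intro s hs w hw
    cases s with
    | nil => simp [W] at hw
    | cons c t =>
      by_cases hc : PySem.Chars.isspace c = true
      · rw [W, if_pos hc] at hw
        exact ih t (by simpa using Nat.le_of_succ_le_succ hs) w hw
      · rw [W, if_neg hc] at hw
        rcases List.mem_cons.mp hw with h | h
        · subst h; simp
        · exact ih (t.dropWhile notSp) (le_trans (List.length_dropWhile_le _ _) (by simpa using Nat.le_of_succ_le_succ hs)) w h

theorem isupper_bounds (c : Char) (h : PySem.Chars.isupper c = true) : 65 ≤ c.toNat ∧ c.toNat ≤ 90 := by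
  simp [PySem.Chars.isupper, Char.le_def] at h
  exact h

theorem isspace_lowerChar (c : Char) :
    PySem.Chars.isspace (PySem.Chars.lowerChar c) = PySem.Chars.isspace c := by
  unfold PySem.Chars.lowerChar
  by_cases h : PySem.Chars.isupper c = true
  · obtain ⟨h1, h2⟩ := isupper_bounds c h
    rw [if_pos h]
    have hv : (Char.ofNat (c.toNat + 32)).toNat = c.toNat + 32 := by
      rw [Char.toNat_ofNat]
      rw [if_pos]
      unfold Nat.isValidChar
      left; omega
    simp only [PySem.Chars.isspace, hv]
    rw [Bool.eq_iff_iff]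
    simp only [Bool.or_eq_true, Bool.and_eq_true, decide_eq_true_eq]
    omega
  · rw [if_neg h]

theorem notSp_lowerChar : (notSp ∘ PySem.Chars.lowerChar) = notSp := by
  funext c
  simp [notSp, isspace_lowerChar]

theorem W_map_lower : ∀ (n : Nat) (s : List Char), s.length ≤ n →
    W (s.map PySem.Chars.lowerChar) = (W s).map (List.map PySem.Chars.lowerChar) := by
  intro n
  induction n with
  | zero =>
    intro s hs
    have : s = [] := by cases s <;> simp_all
    subst this; simp [W]
  | succ n ih =>
    intro s hs
    cases s with
    | nil => simp [W]
    | cons c t =>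
      have ht : t.length ≤ n := by simpa using Nat.le_of_succ_le_succ hs
      by_cases hc : PySem.Chars.isspace c = true
      · rw [List.map_cons, W, if_pos (by rw [isspace_lowerChar]; exact hc), W, if_pos hc]
        exact ih t ht
      · rw [List.map_cons, W, if_neg (by rw [isspace_lowerChar]; exact hc), W, if_neg hc]
        rw [List.takeWhile_map, List.dropWhile_map, notSp_lowerChar]
        rw [ih (t.dropWhile notSp) (le_trans (List.length_dropWhile_le _ _) ht)]
        simp

-- the line-break predicate of PySem.Chars.splitlines
def lineB (c : Char) : Bool :=
  have n := c.toNat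
  decide (n = 10) || decide (n = 13) || decide (n = 11) || decide (n = 12) || decide (n = 28) ||
    decide (n = 29) || decide (n = 30) || decide (n = 133) || decide (n = 8232) || decide (n = 8233)

theorem lineB_isspace (c : Char) (h : lineB c = true) : PySem.Chars.isspace c = true := by
  simp only [lineB, Bool.or_eq_true, decide_eq_true_eq] at h
  simp only [PySem.Chars.isspace, Bool.or_eq_true, Bool.and_eq_true, decide_eq_true_eq]
  omega

theorem splitlines_eq_go (s : List Char) :
    PySem.Chars.splitlines s = PySem.Chars.splitlines.go lineB s [] [] := rfl

-- splitting into lines and collecting each line's words gives the words of the whole text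
theorem flatMap_W_splitlines_go : ∀ (n : Nat) (s : List Char), s.length ≤ n →
    ∀ (cur : List Char) (acc : List (List Char)),
    (PySem.Chars.splitlines.go lineB s cur acc).flatMap W =
      acc.reverse.flatMap W ++ W (cur.reverse ++ s) := by
  intro n
  induction n with
  | zero =>
    intro s hs cur acc
    have : s = [] := by cases s <;> simp_all
    subst this
    cases cur with
    | nil => simp [PySem.Chars.splitlines.go, W]
    | cons a b => simp [PySem.Chars.splitlines.go]
  | succ n ih =>
    intro s hs cur acc
    cases s with
    | nil =>
      cases cur with
      | nil => simp [PySem.Chars.splitlines.go, W]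
      | cons a b => simp [PySem.Chars.splitlines.go]
    | cons c t =>
      have ht : t.length ≤ n := by simpa using Nat.le_of_succ_le_succ hs
      by_cases hcr : c = '\r' ∧ ∃ t', t = '\n' :: t'
      · obtain ⟨hc, t', ht'⟩ := hcr
        subst hc; subst ht'
        have ht'' : t'.length ≤ n := by simp at ht; omega
        rw [show PySem.Chars.splitlines.go lineB ('\r' :: '\n' :: t') cur acc =
            PySem.Chars.splitlines.go lineB t' [] (cur.reverse :: acc) from rfl]
        rw [ih t' ht'' [] (cur.reverse :: acc)]
        simp only [List.reverse_cons, List.flatMap_append, List.flatMap_cons, List.flatMap_nil,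
          List.reverse_nil, List.nil_append, List.append_nil]
        rw [W_append_space cur.reverse.length _ le_rfl '\r' _ (by decide)]
        rw [show W ('\n' :: t') = W t' from by rw [W, if_pos (by decide)]]
        simp
      · have hgo : PySem.Chars.splitlines.go lineB (c :: t) cur acc =
            if lineB c then PySem.Chars.splitlines.go lineB t [] (cur.reverse :: acc)
            else PySem.Chars.splitlines.go lineB t (c :: cur) acc := by
          rw [PySem.Chars.splitlines.go.eq_def]
          split
          · simp_all
          · rename_i rest h2
            rw [List.cons.injEq] at h2
            exact absurd ⟨h2.1, rest, h2.2⟩ hcr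
          · rename_i h1 h2
            injection h2 with e1 e2
            subst e1; subst e2
            rfl
        rw [hgo]
        by_cases hb : lineB c = true
        · rw [if_pos hb, ih t ht [] (cur.reverse :: acc)]
          simp only [List.reverse_cons, List.flatMap_append, List.flatMap_cons, List.flatMap_nil,
            List.reverse_nil, List.nil_append, List.append_nil]
          rw [W_append_space cur.reverse.length _ le_rfl c _ (lineB_isspace c hb)]
          simp
        · rw [if_neg hb, ih t ht (c :: cur) acc]
          simp

theorem flatMap_W_splitlines (s : List Char) :
    (PySem.Chars.splitlines s).flatMap W = W s := by
  rw [splitlines_eq_go, flatMap_W_splitlines_go s.length s le_rfl [] []]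
  simp

-- the char-level core: A's per-line word gathering equals B's one-shot split of the lowered text
theorem chars_main (cs : List Char) :
    (PySem.Chars.splitlines cs).flatMap
        (fun l => W ((PySem.Chars.strip l).map PySem.Chars.lowerChar)) =
      W (cs.map PySem.Chars.lowerChar) := by
  have h1 : ∀ l : List Char, W ((PySem.Chars.strip l).map PySem.Chars.lowerChar) =
      (W l).map (List.map PySem.Chars.lowerChar) := by
    intro l
    rw [W_map_lower (PySem.Chars.strip l).length _ le_rfl, W_strip]
  simp only [h1]
  rw [← List.map_flatMap, flatMap_W_splitlines, W_map_lower cs.length cs le_rfl]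

-- per-line value of A's loop body
theorem g_line (l : List Char) :
    (if PySem.Str.lower (PySem.Str.strip (String.ofList l)) ≠ "" then
        ((PySem.Str.split₀ (PySem.Str.lower (PySem.Str.strip (String.ofList l)))).filter
          (fun w => w ≠ ""))
      else []) =
    (W ((PySem.Chars.strip l).map PySem.Chars.lowerChar)).map String.ofList := by
  have htl : (PySem.Str.lower (PySem.Str.strip (String.ofList l))).toList =
      (PySem.Chars.strip l).map PySem.Chars.lowerChar := by
    simp [PySem.Str.lower, PySem.Str.strip, PySem.Chars.lower]
  have hs : PySem.Str.lower (PySem.Str.strip (String.ofList l)) =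
      String.ofList ((PySem.Chars.strip l).map PySem.Chars.lowerChar) := by
    rw [← String.ofList_toList (s := PySem.Str.lower (PySem.Str.strip (String.ofList l))), htl]
  rw [hs]
  rcases hL : (PySem.Chars.strip l).map PySem.Chars.lowerChar with _ | ⟨a, L'⟩
  · simp [W]
  · rw [if_pos (by simp)]
    rw [PySem.Str.split₀, String.toList_ofList, split₀_eq_W]
    rw [List.filter_map]
    have hfil : List.filter ((fun w => decide (w ≠ "")) ∘ String.ofList) (W (a :: L')) =
        W (a :: L') := by
      apply List.filter_eq_self.mpr
      intro w hw
      have hne := W_mem_ne_nil (a :: L').length (a :: L') le_rfl w hw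
      simp [Function.comp]
      intro hemp
      exact hne hemp
    rw [hfil]

-- the word lists of A and B coincide
theorem words_eq (text : String) :
    ((PySem.Str.splitlines text).foldl (fun ws line =>
      let line2 := PySem.Str.lower (PySem.Str.strip line)
      if line2 ≠ "" then
        ws ++ ((PySem.Str.split₀ line2).filter (fun w => w ≠ ""))
      else ws) []) = PySem.Str.split₀ (PySem.Str.lower text) := by
  have hstep : (fun (ws : List String) (line : String) =>
      let line2 := PySem.Str.lower (PySem.Str.strip line)
      if line2 ≠ "" then ws ++ ((PySem.Str.split₀ line2).filter (fun w => w ≠ "")) else ws) =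
      (fun ws line => ws ++ (if PySem.Str.lower (PySem.Str.strip line) ≠ "" then
        ((PySem.Str.split₀ (PySem.Str.lower (PySem.Str.strip line))).filter (fun w => w ≠ ""))
        else [])) := by
    funext ws line
    by_cases h : PySem.Str.lower (PySem.Str.strip line) ≠ "" <;> simp [h]
  rw [hstep, PySem.List.foldl_append_eq_flatMap]
  rw [PySem.Str.splitlines, List.flatMap_map]
  simp only [g_line]
  rw [← List.map_flatMap, chars_main]
  rw [PySem.Str.split₀, PySem.Str.lower, String.toList_ofList, split₀_eq_W, PySem.Chars.lower]
  simp

-- ===== VERDICT (by name: the statement is the Claim_ definition above) =====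
theorem extract_words_from_text_spec : Claim_equal_extract_words_from_text := by
  intro text keep_spaces _hdom
  show extract_words_from_text text keep_spaces = extract_words_from_text_alt text keep_spaces
  unfold extract_words_from_text extract_words_from_text_alt
  rw [words_eq]
  cases keep_spaces <;> rfl
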